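-- pv_equiv track=rewrite | github.com/Cheung-group/CaXML | Part.2_Network_ML_Natcomm/graphTheory/gephiOutToMLFeatues.py | analogous
-- ===== SOURCE A (Python) =====
-- def analogous(n):
--     translation = {}
--     for num in [20,56,93,129]:
--         for k in range(12):
--             translation[num + k] = k + 1
--     if n in [13,14,15,16]:
--         return n
--     return translation[n]
-- ===== SOURCE B (Python) =====
-- def analogous(n):
--     if n in (13, 14, 15, 16):
--         return n
--     for base in (20, 56, 93, 129):
--         if base <= n < base + 12:
--             return n - base + 1
--     raise KeyError(n)
-- ===== Notes on version B (the rewrite author's own statement) =====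
-- stated objective: simpler
-- what changed: Replaces the 48-entry translation dict built by nested loops with direct range arithmetic over the four base offsets (n - base + 1).
import Mathlib
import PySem

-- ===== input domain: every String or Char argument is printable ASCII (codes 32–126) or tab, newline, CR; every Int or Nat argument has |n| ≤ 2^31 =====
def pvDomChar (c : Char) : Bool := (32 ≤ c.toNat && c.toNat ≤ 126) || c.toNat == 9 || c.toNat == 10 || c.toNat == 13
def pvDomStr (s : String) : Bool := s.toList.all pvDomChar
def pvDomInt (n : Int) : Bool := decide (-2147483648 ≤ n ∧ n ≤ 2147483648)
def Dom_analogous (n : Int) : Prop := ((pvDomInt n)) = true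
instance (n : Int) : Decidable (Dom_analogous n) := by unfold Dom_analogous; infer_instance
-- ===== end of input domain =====

set_option maxRecDepth 4096


-- B replaces A's 48-entry lookup table with direct arithmetic over the four ranges (simpler).

-- ===== PORT A =====
-- builds the translation dict exactly as A's nested loops do, then looks n up
def analogous (n : Int) : Int :=
  let translation : PySem.Dict Int Int :=
    [(20 : Int), 56, 93, 129].foldl
      (fun d num => (PySem.List.pyRange 0 12 1).foldl
        (fun d k => d.insert (num + k) (k + 1)) d)
      PySem.Dict.empty
  if [(13 : Int), 14, 15, 16].contains n then n
  else (translation.getD n 0)   -- Pre_ guarantees n is a key (KeyError excluded)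

-- ===== PORT B =====
def analogousAltLoop (n : Int) : List Int → Int
  | [] => 0   -- unreachable under Pre_ (B raises KeyError here)
  | b :: rest => if b ≤ n ∧ n < b + 12 then n - b + 1 else analogousAltLoop n rest

def analogous_alt (n : Int) : Int :=
  if [(13 : Int), 14, 15, 16].contains n then n
  else analogousAltLoop n [20, 56, 93, 129]

-- ===== PRECONDITION & SPEC =====
-- Pre_ excludes exactly the inputs on which A raises KeyError (n not in {13..16} nor any of the four 12-wide ranges)
def Pre_analogous (n : Int) : Prop :=
  (13 ≤ n ∧ n ≤ 16) ∨ (20 ≤ n ∧ n < 32) ∨ (56 ≤ n ∧ n < 68) ∨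
  (93 ≤ n ∧ n < 105) ∨ (129 ≤ n ∧ n < 141)
instance (n : Int) : Decidable (Pre_analogous n) := by unfold Pre_analogous; infer_instance

def pvWitness_analogous : Int := 21

def Spec_analogous (n : Int) (out : Int) : Prop := out = analogous_alt n
instance (n : Int) (out : Int) : Decidable (Spec_analogous n out) := by unfold Spec_analogous; infer_instance

-- ===== CLAIM (what is proved, stated in full; the proofs are below) =====
def Claim_equal_analogous : Prop := ∀ (n : Int), Dom_analogous n → Pre_analogous n → Spec_analogous n (analogous n)

-- ===== LEMMAS AND PROOFS =====

-- ===== VERDICT (by name: the statement is the Claim_ definition above) =====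
theorem analogous_spec : Claim_equal_analogous := by
  unfold Claim_equal_analogous
  intro n _ hpre
  unfold Pre_analogous at hpre
  rcases hpre with ⟨h1, h2⟩ | ⟨h1, h2⟩ | ⟨h1, h2⟩ | ⟨h1, h2⟩ | ⟨h1, h2⟩ <;>
    (interval_cases n <;> decide)
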